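-- pv_equiv track=rewrite | github.com/dennyzhang/devops_public | python/tcp_port_scan/tcp_port_scan.py | string_remove_patterns
-- ===== SOURCE A (Python) =====
-- def string_remove_patterns(string, opt_list):
--     l = []
--     # remove entries from string
--     for line in string.split("\n"):
--         should_remove = False
--         for item in opt_list:
--             if item in line:
--                 should_remove = True
--         if should_remove is False:
--             l.append(line)
--     return "\n".join(l)
-- ===== SOURCE B (Python) =====
-- def string_remove_patterns(string, opt_list):
--     # pattern-major: successively filter the line list by each pattern
--     lines = string.split("\n")
--     for p in opt_list:
--         lines = [line for line in lines if p not in line]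
--     return "\n".join(lines)
-- ===== Notes on version B (the rewrite author's own statement) =====
-- stated objective: alternative
-- what changed: A scans every pattern against every line with a boolean flag and appends survivors; B inverts the traversal: it iterates pattern-major, successively filtering the shrinking line list by each pattern, then joins.
import Mathlib
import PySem

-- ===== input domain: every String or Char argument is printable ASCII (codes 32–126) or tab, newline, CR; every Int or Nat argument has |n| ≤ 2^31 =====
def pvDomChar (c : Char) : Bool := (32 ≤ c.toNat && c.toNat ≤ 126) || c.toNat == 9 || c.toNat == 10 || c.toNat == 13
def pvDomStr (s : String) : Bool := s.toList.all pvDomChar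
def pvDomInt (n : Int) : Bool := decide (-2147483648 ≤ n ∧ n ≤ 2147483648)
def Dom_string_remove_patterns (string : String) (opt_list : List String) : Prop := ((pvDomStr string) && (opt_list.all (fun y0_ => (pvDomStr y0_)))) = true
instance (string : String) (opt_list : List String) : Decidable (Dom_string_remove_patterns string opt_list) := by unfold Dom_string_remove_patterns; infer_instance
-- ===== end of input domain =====

-- B inverts A's traversal: pattern-major successive filtering of the line list instead of
-- a per-line scan over all patterns with a boolean flag (alternative decomposition, same cost class).

-- ===== PORT A =====
def string_remove_patterns (string : String) (opt_list : List String) : String :=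
  let l : List String :=
    ((PySem.Str.split? string "\n").getD []).foldl
      (fun l line =>
        let should_remove :=
          opt_list.foldl (fun b item => if PySem.Str.isIn item line then true else b) false
        if should_remove = false then l ++ [line] else l)
      []
  PySem.Str.join "\n" l

-- ===== PORT B =====
def string_remove_patterns_alt (string : String) (opt_list : List String) : String :=
  let lines := (PySem.Str.split? string "\n").getD []
  let lines := opt_list.foldl (fun ls p => ls.filter (fun line => !(PySem.Str.isIn p line))) lines
  PySem.Str.join "\n" lines

-- ===== PRECONDITION & SPEC =====
def Spec_string_remove_patterns (string : String) (opt_list : List String) (out : String) : Prop := out = string_remove_patterns_alt string opt_list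
instance (string : String) (opt_list : List String) (out : String) : Decidable (Spec_string_remove_patterns string opt_list out) := by unfold Spec_string_remove_patterns; infer_instance

-- ===== CLAIM (what is proved, stated in full; the proofs are below) =====
def Claim_equal_string_remove_patterns : Prop := ∀ (string : String) (opt_list : List String), Dom_string_remove_patterns string opt_list → Spec_string_remove_patterns string opt_list (string_remove_patterns string opt_list)

-- ===== LEMMAS AND PROOFS =====

-- A's flag loop over the patterns computes 'some pattern occurs in the line'
theorem pv_flag_eq_any (opt_list : List String) (line : String) (b : Bool) :
    opt_list.foldl (fun b item => if PySem.Str.isIn item line then true else b) b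
      = (b || opt_list.any (fun item => PySem.Str.isIn item line)) := by
  induction opt_list generalizing b with
  | nil => simp
  | cons p ps ih =>
      rw [List.foldl_cons, ih, List.any_cons]
      cases b <;> cases hp : PySem.Str.isIn p line <;> simp [hp]

-- 'keep' test: 'the flag is false' decided, as B's all-patterns-absent test
theorem pv_keep_eq {α : Type} (f : α → Bool) (l : List α) :
    decide ((l.any f) = false) = l.all (fun p => !(f p)) := by
  cases h : l.any f <;> simp [List.all_eq_not_any_not, h]

-- B's successive filtering computes a single filter by 'no pattern occurs'
theorem pv_foldl_filter (opt_list : List String) (lines : List String) :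
    opt_list.foldl (fun ls p => ls.filter (fun line => !(PySem.Str.isIn p line))) lines
      = lines.filter (fun line => opt_list.all (fun p => !(PySem.Str.isIn p line))) := by
  induction opt_list generalizing lines with
  | nil => simp
  | cons p ps ih =>
      simp only [List.foldl_cons, ih, List.filter_filter, List.all_cons]
      exact List.filter_congr (fun x _ => by rw [Bool.and_comm])

theorem string_remove_patterns_eq (string : String) (opt_list : List String) :
    string_remove_patterns string opt_list = string_remove_patterns_alt string opt_list := by
  simp only [string_remove_patterns, string_remove_patterns_alt]
  simp only [pv_flag_eq_any, Bool.false_or, pv_foldl_filter,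
    PySem.List.foldl_append_ite_eq_filter, List.nil_append]
  congr 1
  exact List.filter_congr (fun x _ => pv_keep_eq _ _)

-- ===== VERDICT (by name: the statement is the Claim_ definition above) =====
theorem string_remove_patterns_spec : Claim_equal_string_remove_patterns := by
  intro string opt_list _
  exact string_remove_patterns_eq string opt_list
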